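-- pv_equiv track=rewrite | github.com/chulbioinfo/ReAlignPro | src/realignpro/fa2maf.py | _strip_io_flags
-- ===== SOURCE A (Python) =====
-- from typing import Dict, List, Optional, Tuple
--
-- def _strip_io_flags(tokens: List[str]) -> List[str]:
--     """Remove input/output flags that would conflict with our own base command."""
--     io_flags = {"-in", "-out", "-align", "-output"}
--     out: List[str] = []
--     i = 0
--     while i < len(tokens):
--         t = tokens[i]
--         if t in io_flags:
--             # Skip flag and its value if present
--             i += 1
--             if i < len(tokens) and not tokens[i].startswith("-"):
--                 i += 1
--             continue
--         out.append(t)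
--         i += 1
--     return out
-- ===== SOURCE B (Python) =====
-- def _strip_io_flags(tokens):
--     """Remove input/output flags that would conflict with our own base command.
--
--     Stateless reformulation: a token is dropped iff it is itself an io flag, or
--     its immediate predecessor is an io flag and the token does not start with
--     '-'. This is sound because a flag token can never be consumed as a value
--     (values must not start with '-', while every flag does), so "predecessor is
--     a flag" always means the predecessor acted as a flag.
--     """
--     io_flags = {"-in", "-out", "-align", "-output"}
--     prevs = [""] + tokens  # "" is never a flag; zip truncates the extra tail
--     return [t for p, t in zip(prevs, tokens)
--             if t not in io_flags and not (p in io_flags and not t.startswith("-"))]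
-- ===== Notes on version B (the rewrite author's own statement) =====
-- stated objective: alternative
-- what changed: Replaced A's stateful index walk with inline lookahead by a stateless pairwise filter: zip each token with its predecessor and keep it by a local predicate, correct because a flag token can never be consumed as a value (values must not start with '-').
import Mathlib
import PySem

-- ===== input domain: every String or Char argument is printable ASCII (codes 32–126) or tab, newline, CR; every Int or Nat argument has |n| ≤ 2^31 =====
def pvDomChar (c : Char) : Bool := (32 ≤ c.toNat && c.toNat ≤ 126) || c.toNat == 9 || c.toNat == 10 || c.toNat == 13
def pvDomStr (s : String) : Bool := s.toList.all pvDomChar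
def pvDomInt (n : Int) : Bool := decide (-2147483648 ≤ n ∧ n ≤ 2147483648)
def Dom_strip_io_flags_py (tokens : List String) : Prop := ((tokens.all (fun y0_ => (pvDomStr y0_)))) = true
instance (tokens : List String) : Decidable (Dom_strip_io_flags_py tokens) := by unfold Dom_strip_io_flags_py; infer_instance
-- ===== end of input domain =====

-- B replaces A's stateful index walk by a stateless pairwise filter over (predecessor, token) pairs (alternative decomposition, same cost).


-- the Python set literal {"-in","-out","-align","-output"}; membership test only
def pvIoFlags : List String := ["-in", "-out", "-align", "-output"]

-- ===== PORT A =====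
-- A's while loop over index i, transliterated as recursion on the remaining suffix:
-- on a flag, advance past it and, if the next token exists and does not start with "-", past that too.
def stripGoA : List String → List String
  | [] => []
  | t :: rest =>
    if pvIoFlags.contains t then
      match rest with
      | [] => []
      | v :: rest' =>
        if ¬ (PySem.Str.startswith v "-") then stripGoA rest' else stripGoA (v :: rest')
    else t :: stripGoA rest
  termination_by l => l.length
  decreasing_by all_goals simp

def strip_io_flags_py (tokens : List String) : List String := stripGoA tokens

-- ===== PORT B =====
-- B's local keep-predicate on a (predecessor, token) pair
def pvKeep (p : String × String) : Bool :=
  !(pvIoFlags.contains p.2) && !(pvIoFlags.contains p.1 && !(PySem.Str.startswith p.2 "-"))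

-- B: zip tokens with their predecessors ("" sentinel in front; zip truncates) and filter pointwise
def strip_io_flags_py_alt (tokens : List String) : List String :=
  (List.zip ("" :: tokens) tokens).filter pvKeep |>.map Prod.snd

-- ===== PRECONDITION & SPEC =====
def Spec_strip_io_flags_py (tokens : List String) (out : List String) : Prop := out = strip_io_flags_py_alt tokens
instance (tokens : List String) (out : List String) : Decidable (Spec_strip_io_flags_py tokens out) := by unfold Spec_strip_io_flags_py; infer_instance

-- ===== CLAIM (what is proved, stated in full; the proofs are below) =====
def Claim_equal_strip_io_flags_py : Prop := ∀ (tokens : List String), Dom_strip_io_flags_py tokens → Spec_strip_io_flags_py tokens (strip_io_flags_py tokens)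

-- ===== LEMMAS AND PROOFS =====

-- B's filter with an explicit predecessor in front, for the induction
def pvG (prev : String) (l : List String) : List String :=
  (List.zip (prev :: l) l).filter pvKeep |>.map Prod.snd

-- what A computes right after consuming a flag
def afterFlagA : List String → List String
  | [] => []
  | v :: r => if ¬ (PySem.Str.startswith v "-") then stripGoA r else stripGoA (v :: r)

theorem pvG_cons (prev t : String) (rest : List String) :
    pvG prev (t :: rest) = (if pvKeep (prev, t) then [t] else []) ++ pvG t rest := by
  simp only [pvG, List.zip_cons_cons, List.filter_cons]
  split <;> simp_all

-- every io flag starts with "-"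
theorem flag_startswith {t : String} (h : t ∈ pvIoFlags) :
    PySem.Chars.startswith t.toList ['-'] = true := by
  simp [pvIoFlags] at h
  rcases h with h | h | h | h <;> subst h <;> decide

theorem pvG_eq_aux : ∀ (n : Nat) (l : List String) (prev : String), l.length ≤ n →
    pvG prev l = (if prev ∈ pvIoFlags then afterFlagA l else stripGoA l) := by
  intro n
  induction n with
  | zero =>
    intro l prev hl
    have : l = [] := List.eq_nil_of_length_eq_zero (Nat.le_zero.mp hl)
    subst this; simp [pvG, afterFlagA, stripGoA]
  | succ n IH =>
    intro l prev hl
    cases l with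
    | nil => simp [pvG, afterFlagA, stripGoA]
    | cons t rest =>
      have hrest : rest.length ≤ n := by simp at hl; omega
      rw [pvG_cons, IH rest t hrest]
      by_cases hp : prev ∈ pvIoFlags
      · by_cases hs : PySem.Chars.startswith t.toList ['-'] = true
        · -- dash token after a flag: not consumed, reprocessed
          by_cases ht : t ∈ pvIoFlags
          · cases rest <;> simp [pvKeep, hp, hs, ht, afterFlagA, stripGoA]
          · cases rest <;> simp [pvKeep, hp, hs, ht, afterFlagA, stripGoA]
        · -- non-dash token after a flag: consumed; it cannot itself be a flag
          have ht : t ∉ pvIoFlags := fun hm => hs (flag_startswith hm)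
          simp [pvKeep, hp, hs, ht, afterFlagA]
      · by_cases ht : t ∈ pvIoFlags
        · cases rest <;> simp [pvKeep, hp, ht, afterFlagA, stripGoA]
        · cases rest <;> simp [pvKeep, hp, ht, stripGoA]

-- ===== VERDICT (by name: the statement is the Claim_ definition above) =====
theorem strip_io_flags_py_spec : Claim_equal_strip_io_flags_py := by
  intro tokens _
  unfold Spec_strip_io_flags_py strip_io_flags_py strip_io_flags_py_alt
  have h := pvG_eq_aux tokens.length tokens "" le_rfl
  simp [pvIoFlags] at h
  simpa [pvG] using h.symm
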